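-- pv_equiv track=rewrite | github.com/evigog/DT2119_labs_2018 | lab3/lab3_proto.py | words2phones
-- ===== SOURCE A (Python) =====
-- def words2phones(wordList, pronDict, addSilence=True, addShortPause=False):
--     """ word2phones: converts word level to phone level transcription adding silence
--
--     Args:
--        wordList: list of word symbols
--        pronDict: pronunciation dictionary. The keys correspond to words in wordList
--        addSilence: if True, add initial and final silence
--        addShortPause: if True, add short pause model "sp" at end of each word
--     Output:
--        list of phone symbols
--     """
--     phoneTrans = []
--     for word in wordList:
--         p = pronDict[word] + ['sp']
--         phoneTrans.append(p)
--
--     # flatten list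
--     flat_list = [item for sublist in phoneTrans for item in sublist]
--
--     # no pause model after the last word
--     flat_list = flat_list[:-1]
--
--     # add silence in beginnind and end
--     flat_list = ['sil'] + flat_list
--     flat_list.append(('sil'))
--
--     return flat_list
-- ===== SOURCE B (Python) =====
-- def words2phones(wordList, pronDict, addSilence=True, addShortPause=False):
--     """Single direct pass: 'sp' between consecutive words, 'sil' at both ends."""
--     out = ['sil']
--     for i, word in enumerate(wordList):
--         if i != 0:
--             out.append('sp')
--         out = out + pronDict[word]
--     out.append('sil')
--     return out
-- ===== Notes on version B (the rewrite author's own statement) =====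
-- stated objective: simpler
-- what changed: B builds the result in one direct pass, inserting 'sp' between consecutive words, instead of A's build-per-word-sublists / flatten / slice-off-the-last-'sp' pipeline.
import Mathlib
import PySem

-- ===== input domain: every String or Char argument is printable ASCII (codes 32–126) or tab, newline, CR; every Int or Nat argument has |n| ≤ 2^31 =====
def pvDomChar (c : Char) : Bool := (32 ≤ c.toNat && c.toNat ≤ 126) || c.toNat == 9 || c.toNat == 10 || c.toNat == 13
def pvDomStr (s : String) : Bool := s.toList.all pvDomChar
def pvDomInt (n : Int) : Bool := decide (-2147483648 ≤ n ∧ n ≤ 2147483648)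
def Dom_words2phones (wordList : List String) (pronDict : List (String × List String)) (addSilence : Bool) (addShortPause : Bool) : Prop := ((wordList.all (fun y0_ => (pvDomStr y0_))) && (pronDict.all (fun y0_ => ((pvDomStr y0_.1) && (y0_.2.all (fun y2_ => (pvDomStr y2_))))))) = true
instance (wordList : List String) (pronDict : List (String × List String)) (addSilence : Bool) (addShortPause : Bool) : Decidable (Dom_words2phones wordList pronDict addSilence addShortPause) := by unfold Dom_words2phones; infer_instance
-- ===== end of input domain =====

-- B builds the phone transcription in one direct pass ('sp' between consecutive words)
-- instead of A's per-word-sublists / flatten / slice-off-the-last-'sp' pipeline (objective: simpler).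


-- ===== PORT A =====
-- pronDict[word]: first-match lookup in the association list (Python dict lookup)
def pronOf (pronDict : List (String × List String)) (word : String) : List String :=
  (pronDict.lookup word).getD []

def words2phones (wordList : List String) (pronDict : List (String × List String)) (addSilence : Bool) (addShortPause : Bool) : List String :=
  -- phoneTrans.append(pronDict[word] + ['sp']) for each word
  let phoneTrans : List (List String) :=
    wordList.foldl (fun acc word => acc ++ [pronOf pronDict word ++ ["sp"]]) []
  -- flatten via comprehension
  let flatList : List String :=
    phoneTrans.foldl (fun acc sublist => sublist.foldl (fun a item => a ++ [item]) acc) []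
  -- flat_list = flat_list[:-1]
  let flatList := PySem.List.slice flatList none (some (-1))
  -- ['sil'] + flat_list ; flat_list.append('sil')
  (["sil"] ++ flatList) ++ ["sil"]

-- ===== PORT B =====
def words2phones_alt (wordList : List String) (pronDict : List (String × List String)) (addSilence : Bool) (addShortPause : Bool) : List String :=
  let out : List String :=
    (PySem.List.enumerate wordList 0).foldl
      (fun out iw => (if iw.1 ≠ 0 then out ++ ["sp"] else out) ++ pronOf pronDict iw.2) ["sil"]
  out ++ ["sil"]

-- ===== PRECONDITION & SPEC =====
-- Pre_ excludes exactly the inputs where a word is missing from pronDict (Python A raises KeyError; B raises there too)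
def Pre_words2phones (wordList : List String) (pronDict : List (String × List String)) (addSilence : Bool) (addShortPause : Bool) : Prop :=
  (wordList.all (fun w => pronDict.any (fun p => p.1 == w))) = true
instance (wordList : List String) (pronDict : List (String × List String)) (addSilence : Bool) (addShortPause : Bool) : Decidable (Pre_words2phones wordList pronDict addSilence addShortPause) := by unfold Pre_words2phones; infer_instance
def pvWitness_words2phones : List String × (List (String × List String)) × Bool × Bool :=
  (["cat", "dog"], [("cat", ["k", "ae", "t"]), ("dog", ["d", "ao", "g"])], true, false)

def Spec_words2phones (wordList : List String) (pronDict : List (String × List String)) (addSilence : Bool) (addShortPause : Bool) (out : List String) : Prop := out = words2phones_alt wordList pronDict addSilence addShortPause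
instance (wordList : List String) (pronDict : List (String × List String)) (addSilence : Bool) (addShortPause : Bool) (out : List String) : Decidable (Spec_words2phones wordList pronDict addSilence addShortPause out) := by unfold Spec_words2phones; infer_instance

-- ===== CLAIM (what is proved, stated in full; the proofs are below) =====
def Claim_equal_words2phones : Prop := ∀ (wordList : List String) (pronDict : List (String × List String)) (addSilence : Bool) (addShortPause : Bool), Dom_words2phones wordList pronDict addSilence addShortPause → Pre_words2phones wordList pronDict addSilence addShortPause → Spec_words2phones wordList pronDict addSilence addShortPause (words2phones wordList pronDict addSilence addShortPause)

-- ===== LEMMAS AND PROOFS =====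

-- A's phoneTrans loop is a map
theorem phoneTrans_eq (wordList : List String) (pronDict : List (String × List String))
    (acc : List (List String)) :
    wordList.foldl (fun acc word => acc ++ [pronOf pronDict word ++ ["sp"]]) acc
      = acc ++ wordList.map (fun word => pronOf pronDict word ++ ["sp"]) := by
  induction wordList generalizing acc with
  | nil => simp
  | cons w ws ih => simp [List.foldl, ih]

-- the inner comprehension loop appends the sublist
theorem inner_flat (sublist acc : List String) :
    sublist.foldl (fun a item => a ++ [item]) acc = acc ++ sublist := by
  induction sublist generalizing acc with
  | nil => simp
  | cons x xs ih => simp [List.foldl, ih]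

-- A's flatten loop is List.flatten
theorem flat_eq (lss : List (List String)) (acc : List String) :
    lss.foldl (fun acc sublist => sublist.foldl (fun a item => a ++ [item]) acc) acc
      = acc ++ lss.flatten := by
  induction lss generalizing acc with
  | nil => simp
  | cons l ls ih => rw [List.foldl_cons, inner_flat, ih]; simp

-- B's loop over the tail (indices ≥ 1) prepends "sp" to every word's phones
theorem alt_tail (ws : List String) (pronDict : List (String × List String))
    (s : Int) (hs : 1 ≤ s) (acc : List String) :
    (PySem.List.enumerate ws s).foldl
        (fun out iw => (if iw.1 ≠ 0 then out ++ ["sp"] else out) ++ pronOf pronDict iw.2) acc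
      = acc ++ (ws.map (fun w => "sp" :: pronOf pronDict w)).flatten := by
  induction ws generalizing s acc with
  | nil => simp [PySem.List.enumerate_nil]
  | cons w ws ih =>
      rw [PySem.List.enumerate_cons, List.foldl_cons, if_pos (by omega : s ≠ 0),
        ih (s + 1) (by omega)]
      simp

-- structure of the flattened per-word-plus-sp lists: separators in front, one trailing "sp"
theorem sp_shift (f : String → List String) (vs : List String) :
    "sp" :: (vs.map (fun x => f x ++ ["sp"])).flatten
      = (vs.map (fun x => "sp" :: f x)).flatten ++ ["sp"] := by
  induction vs with
  | nil => simp
  | cons v vs ih =>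
      simp only [List.map_cons, List.flatten_cons, List.cons_append, List.append_assoc, List.nil_append,
        List.singleton_append]
      rw [ih]

theorem flat_struct (f : String → List String) (w : String) (ws : List String) :
    ((w :: ws).map (fun x => f x ++ ["sp"])).flatten
      = (f w ++ (ws.map (fun x => "sp" :: f x)).flatten) ++ ["sp"] := by
  simp only [List.map_cons, List.flatten_cons]
  rw [List.append_assoc, List.singleton_append, sp_shift f ws]
  simp

-- ===== VERDICT (by name: the statement is the Claim_ definition above) =====
theorem words2phones_spec : Claim_equal_words2phones := by
  intro wordList pronDict addSilence addShortPause _ _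
  unfold Spec_words2phones words2phones words2phones_alt
  simp only [phoneTrans_eq, flat_eq, List.nil_append]
  rw [PySem.List.slice_to_neg_one]
  cases wordList with
  | nil => simp [PySem.List.enumerate_nil]
  | cons w ws =>
      rw [flat_struct (fun word => pronOf pronDict word) w ws, List.dropLast_concat,
        PySem.List.enumerate_cons, List.foldl_cons]
      simp only [if_neg (by simp : ¬ ((0:Int) ≠ 0))]
      rw [alt_tail ws pronDict (0 + 1) (by omega)]
      simp
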